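-- pv_equiv track=rewrite | github.com/IEEE-MAIT/Hacktoberfest | CSES/CSES_1069.py | repeat_counts
-- ===== SOURCE A (Python) =====
-- def repeat_counts(n):
--     if len(n)==1:
--         return 1
--     maxx=c=0
--     for i in range(1,len(n)):
--         if n[i-1]==n[i]:
--             c+=1
--         if n[i-1]!=n[i] or i==len(n)-1:
--             c+=1
--             if maxx<c:
--                 maxx=c
--             c=0
--
--     return maxx
-- ===== SOURCE B (Python) =====
-- def repeat_counts(n):
--     L = len(n)
--     cuts = [0] + [i for i in range(1, L) if n[i] != n[i - 1]] + [L]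
--     return max(b - a for a, b in zip(cuts, cuts[1:]))
-- ===== Notes on version B (the rewrite author's own statement) =====
-- stated objective: alternative
-- what changed: Instead of A's single pass with a running counter and running max, B first computes the list of change-point indices (positions where the character differs from its predecessor, framed by 0 and len(n)) and then returns the maximum gap between consecutive change points.
import Mathlib
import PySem

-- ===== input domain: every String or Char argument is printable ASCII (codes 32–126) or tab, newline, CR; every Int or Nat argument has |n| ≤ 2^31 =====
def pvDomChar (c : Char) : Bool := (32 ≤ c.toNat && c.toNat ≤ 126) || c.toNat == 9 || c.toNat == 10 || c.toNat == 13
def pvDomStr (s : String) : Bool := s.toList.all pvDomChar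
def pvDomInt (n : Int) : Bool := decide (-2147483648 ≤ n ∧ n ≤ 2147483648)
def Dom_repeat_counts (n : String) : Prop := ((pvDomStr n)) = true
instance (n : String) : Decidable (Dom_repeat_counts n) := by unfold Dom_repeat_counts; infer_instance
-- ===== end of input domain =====

-- B replaces A's single pass (running counter + running max with boundary tests) by a
-- staged computation: the list of change-point indices framed by 0 and len(n), then the
-- maximum gap between consecutive change points (objective: alternative decomposition).

-- ===== PORT A =====
-- body of A's for-loop, over the character list of n
def bodyA (l : List Char) (st : Int × Int) (i : Int) : Int × Int :=
  let c := if PySem.List.pyGet? l (i - 1) = PySem.List.pyGet? l i then st.2 + 1 else st.2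
  if PySem.List.pyGet? l (i - 1) ≠ PySem.List.pyGet? l i ∨ i = (l.length : Int) - 1 then
    (if st.1 < c + 1 then c + 1 else st.1, 0)
  else (st.1, c)

def repeat_counts (n : String) : Int :=
  if PySem.Str.len n = 1 then 1
  else ((PySem.List.pyRange 1 (PySem.Str.len n) 1).foldl (bodyA n.toList) ((0 : Int), (0 : Int))).1

-- ===== PORT B =====
-- cuts = [0] + [i for i in range(1, L) if n[i] != n[i-1]] + [L];
-- max(b - a for a, b in zip(cuts, cuts[1:])) — the generator is never empty (cuts has ≥ 2 entries)
def repeat_counts_alt (n : String) : Int :=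
  let l := n.toList
  let L : Int := PySem.Str.len n
  let cuts : List Int :=
    0 :: (PySem.List.pyRange 1 L 1).filter
        (fun i => PySem.List.pyGet? l i != PySem.List.pyGet? l (i - 1)) ++ [L]
  (PySem.List.max? (List.zipWith (fun a b => b - a) cuts (cuts.drop 1)) (fun y => y)).getD 0

-- ===== PRECONDITION & SPEC =====
def Spec_repeat_counts (n : String) (out : Int) : Prop := out = repeat_counts_alt n
instance (n : String) (out : Int) : Decidable (Spec_repeat_counts n out) := by unfold Spec_repeat_counts; infer_instance

-- ===== CLAIM (what is proved, stated in full; the proofs are below) =====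
def Claim_equal_repeat_counts : Prop := ∀ (n : String), Dom_repeat_counts n → Spec_repeat_counts n (repeat_counts n)

-- ===== LEMMAS AND PROOFS =====

-- A's loop, rephrased as structural recursion over (previous char, remaining chars).
def loopRec : Char → List Char → Int × Int → Int × Int
  | _, [], st => st
  | p, y :: ys, (maxx, c) =>
      let c' := if p = y then c + 1 else c
      if p ≠ y ∨ ys = [] then
        loopRec y ys (if maxx < c' + 1 then c' + 1 else maxx, 0)
      else loopRec y ys (maxx, c')

-- run lengths of a char list whose current run (ending at p) has length k
def go : Char → Int → List Char → List Int
  | _, k, [] => [k]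
  | p, k, y :: ys => if y = p then go p (k + 1) ys else k :: go y 1 ys

-- max of an Int list, 0 on empty
def lmax : List Int → Int
  | [] => 0
  | h :: t => t.foldl max h

-- consecutive differences
def gapList (c : List Int) : List Int := List.zipWith (fun a b => b - a) c (c.drop 1)

lemma go_ne_nil (p : Char) (k : Int) (ys : List Char) : go p k ys ≠ [] := by
  induction ys generalizing p k with
  | nil => simp [go]
  | cons y ys ih => simp only [go]; split <;> simp [ih]

lemma foldl_max_init (rs : List Int) (k r : Int) :
    rs.foldl max (max k r) = max k (rs.foldl max r) := by
  induction rs generalizing r with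
  | nil => simp
  | cons a rs ih => simp only [List.foldl_cons, max_assoc, ih]

lemma lmax_cons (k : Int) (rest : List Int) (h : rest ≠ []) :
    lmax (k :: rest) = max k (lmax rest) := by
  cases rest with
  | nil => exact absurd rfl h
  | cons r rs => simp [lmax, foldl_max_init]

lemma lmax_go_pos (ys : List Char) (p : Char) (k : Int) (hk : 1 ≤ k) :
    1 ≤ lmax (go p k ys) := by
  induction ys generalizing p k with
  | nil => simpa [go, lmax] using hk
  | cons y ys ih =>
    simp only [go]
    split
    · exact ih _ _ (by omega)
    · rw [lmax_cons _ _ (go_ne_nil _ _ _)]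
      exact le_max_of_le_right (ih _ _ le_rfl)

lemma loopRec_eq (ys : List Char) (p : Char) (maxx c : Int) (hc : 0 ≤ c) (hys : ys ≠ []) :
    (loopRec p ys (maxx, c)).1 = max maxx (lmax (go p (c + 1) ys)) := by
  induction ys generalizing p maxx c with
  | nil => exact absurd rfl hys
  | cons y ys ih =>
    by_cases hpy : p = y
    · subst hpy
      cases ys with
      | nil =>
        simp [loopRec, go, lmax, max_def]
        split_ifs <;> omega
      | cons z zs =>
        rw [show loopRec p (p :: z :: zs) (maxx, c) = loopRec p (z :: zs) (maxx, c + 1) by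
          simp [loopRec]]
        rw [ih _ _ _ (by omega) (by simp)]
        rw [show go p (c + 1) (p :: z :: zs) = go p (c + 1 + 1) (z :: zs) by simp [go]]
    · have hyp : ¬ y = p := by intro h; exact hpy h.symm
      cases ys with
      | nil =>
        simp [loopRec, go, hpy, hyp, lmax, max_def]
        split_ifs <;> omega
      | cons z zs =>
        rw [show loopRec p (y :: z :: zs) (maxx, c) =
            loopRec y (z :: zs) (if maxx < c + 1 then c + 1 else maxx, 0) by
          simp [loopRec, hpy]]
        rw [ih _ _ _ le_rfl (by simp)]
        rw [show go p (c + 1) (y :: z :: zs) = (c + 1) :: go y (0 + 1) (z :: zs) by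
          simp [go, hyp]]
        rw [lmax_cons _ _ (go_ne_nil _ _ _)]
        rw [show (if maxx < c + 1 then c + 1 else maxx) = max maxx (c + 1) by
          rw [max_def]; split_ifs <;> omega]
        rw [max_assoc]

lemma A_loop (l : List Char) (k : Nat) (hk1 : 1 ≤ k) (hk2 : k ≤ l.length) (st : Int × Int) :
    (PySem.List.pyRange (k : Int) (l.length : Int) 1).foldl (bodyA l) st =
      loopRec (l[k - 1]'(by omega)) (l.drop k) st := by
  rcases lt_or_eq_of_le hk2 with hlt | heq
  · rw [PySem.List.pyRange_one_cons (by exact_mod_cast hlt)]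
    rw [List.foldl_cons]
    have hdrop : l.drop k = l[k]'hlt :: l.drop (k + 1) := List.drop_eq_getElem_cons hlt
    have hget1 : PySem.List.pyGet? l ((k : Int) - 1) = some (l[k - 1]'(by omega)) := by
      rw [show (k : Int) - 1 = ((k - 1 : Nat) : Int) by omega]
      rw [PySem.List.pyGet?_natCast]
      exact List.getElem?_eq_getElem (by omega)
    have hget2 : PySem.List.pyGet? l (k : Int) = some (l[k]'hlt) := by
      rw [PySem.List.pyGet?_natCast]
      exact List.getElem?_eq_getElem hlt
    have hrec := A_loop l (k + 1) (by omega) hlt (bodyA l st (k : Int))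
    rw [show ((k : Int) + 1) = ((k + 1 : Nat) : Int) by push_cast; ring]
    simp only [Nat.add_sub_cancel] at hrec
    rw [hrec, hdrop]
    obtain ⟨maxx, c⟩ := st
    conv_rhs => rw [loopRec]
    have hlast : ((k : Int) = (l.length : Int) - 1) = (l.drop (k + 1) = []) :=
      propext (by rw [List.drop_eq_nil_iff]; omega)
    unfold bodyA
    simp only [hget1, hget2, hlast, Option.some.injEq, ne_eq]
    split_ifs <;> simp_all
  · subst heq
    rw [PySem.List.pyRange_one_eq_nil le_rfl, List.drop_length]
    cases st; rfl
termination_by l.length - k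

lemma gapList_cons (a b : Int) (t : List Int) :
    gapList (a :: b :: t) = (b - a) :: gapList (b :: t) := by
  simp [gapList]

-- B's change points from index j onward, with an open cut at a, produce exactly the
-- run lengths of the suffix (current run has length j - a, previous char l[j-1]).
lemma gap_filter (l : List Char) (j : Nat) (a : Int) (h1 : 1 ≤ j) (h2 : j ≤ l.length) :
    gapList (a :: (PySem.List.pyRange (j : Int) (l.length : Int) 1).filter
        (fun i => PySem.List.pyGet? l i != PySem.List.pyGet? l (i - 1)) ++ [(l.length : Int)]) =
      go (l[j - 1]'(by omega)) ((j : Int) - a) (l.drop j) := by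
  rcases lt_or_eq_of_le h2 with hlt | heq
  · rw [PySem.List.pyRange_one_cons (by exact_mod_cast hlt)]
    have hget1 : PySem.List.pyGet? l ((j : Int) - 1) = some (l[j - 1]'(by omega)) := by
      rw [show (j : Int) - 1 = ((j - 1 : Nat) : Int) by omega, PySem.List.pyGet?_natCast]
      exact List.getElem?_eq_getElem (by omega)
    have hget2 : PySem.List.pyGet? l (j : Int) = some (l[j]'hlt) := by
      rw [PySem.List.pyGet?_natCast]; exact List.getElem?_eq_getElem hlt
    have hdrop : l.drop j = l[j]'hlt :: l.drop (j + 1) := List.drop_eq_getElem_cons hlt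
    have hrec := fun (b : Int) => gap_filter l (j + 1) b (by omega) hlt
    rw [List.filter_cons]
    by_cases hch : l[j]'hlt = l[j - 1]'(by omega)
    · rw [if_neg (by simp [hget1, hget2, hch])]
      have h2' := hrec a
      simp only [Nat.add_sub_cancel] at h2'
      rw [show ((j + 1 : Nat) : Int) = (j : Int) + 1 by push_cast; ring,
        show (j : Int) + 1 - a = ((j : Int) - a) + 1 by ring] at h2'
      rw [h2']
      rw [hdrop, show go (l[j - 1]'(by omega)) ((j : Int) - a) (l[j]'hlt :: l.drop (j + 1)) =
        go (l[j - 1]'(by omega)) (((j : Int) - a) + 1) (l.drop (j + 1)) by simp [go, hch]]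
      rw [hch]
    · rw [if_pos (by simp [hget1, hget2, hch])]
      rw [List.cons_append, List.cons_append, gapList_cons]
      have h2' := hrec (j : Int)
      simp only [Nat.add_sub_cancel] at h2'
      rw [show ((j + 1 : Nat) : Int) = (j : Int) + 1 by push_cast; ring,
        show (j : Int) + 1 - (j : Int) = 1 by ring, List.cons_append] at h2'
      rw [h2']
      rw [hdrop, show go (l[j - 1]'(by omega)) ((j : Int) - a) (l[j]'hlt :: l.drop (j + 1)) =
        ((j : Int) - a) :: go (l[j]'hlt) 1 (l.drop (j + 1)) by simp [go, hch]]
  · subst heq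
    rw [PySem.List.pyRange_one_eq_nil le_rfl, List.drop_length]
    simp [gapList, go]
termination_by l.length - j

lemma alt_eq (n : String) : repeat_counts_alt n =
    match n.toList with
    | [] => 0
    | x :: ys => lmax (go x 1 ys) := by
  unfold repeat_counts_alt
  rw [show PySem.Str.len n = ((n.toList.length : Nat) : Int) from rfl]
  cases h : n.toList with
  | nil =>
    dsimp only
    norm_num [PySem.List.pyRange_one_eq_nil, PySem.List.max?, gapList]
  | cons x ys =>
    dsimp only
    have hg := gap_filter (x :: ys) 1 0 le_rfl (by simp)
    simp only [Nat.cast_one, sub_zero, show (1 : Nat) - 1 = 0 from rfl,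
      List.getElem_cons_zero, List.drop_one, List.tail_cons, gapList] at hg
    simp only [List.drop_one]
    rw [hg]
    cases hgo : go x 1 ys with
    | nil => exact absurd hgo (go_ne_nil _ _ _)
    | cons hd t => simp [PySem.List.max?_id_cons, lmax]

-- ===== VERDICT (by name: the statement is the Claim_ definition above) =====
theorem repeat_counts_spec : Claim_equal_repeat_counts := by
  intro n _
  show repeat_counts n = repeat_counts_alt n
  rw [alt_eq]
  unfold repeat_counts
  rw [show PySem.Str.len n = ((n.toList.length : Nat) : Int) from rfl]
  cases h : n.toList with
  | nil => simp [PySem.List.pyRange_one_eq_nil]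
  | cons x ys =>
    cases ys with
    | nil => simp [lmax, go]
    | cons z zs =>
      simp only [List.length_cons]
      rw [if_neg (by push_cast; omega)]
      have hA := A_loop (x :: z :: zs) 1 le_rfl (by simp) (0, 0)
      rw [show ((1 : Nat) : Int) = 1 from rfl] at hA
      simp only [List.length_cons] at hA
      rw [hA]
      simp only [List.drop_one, List.tail_cons, show (1 : Nat) - 1 = 0 from rfl,
        List.getElem_cons_zero]
      rw [loopRec_eq _ _ _ _ le_rfl (by simp), show (0 : Int) + 1 = 1 by ring]
      have := lmax_go_pos (z :: zs) x 1 le_rfl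
      omega
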